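-- pv_equiv track=rewrite | github.com/Maksimym200/Python | vigenere.py | _get_data_list
-- ===== SOURCE A (Python) =====
-- from collections import Counter as _Counter
--
-- def _get_data_list(_text, _key):
--     _data_list = []
--     for _i in range(_key):
--         _data_list.append(_Counter())
--     for _i in range(len(_text)):
--         if _text[_i].isalpha():
--             _data_list[_i % _key] += _Counter({_text[_i]})
--     return _data_list
-- ===== SOURCE B (Python) =====
-- from collections import Counter as _Counter
--
-- def _get_data_list(_text, _key):
--     return [_Counter(c for c in _text[i::_key] if c.isalpha())
--             for i in range(_key)]
-- ===== Notes on version B (the rewrite author's own statement) =====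
-- stated objective: faster
-- what changed: Transposed the computation: instead of one per-character pass that dispatches each letter into a mutable list of Counters via i % key, B builds each key-position's Counter directly from the strided slice _text[i::_key], letting slicing and Counter() count in C and dropping the per-character Counter allocation and +=.
import Mathlib
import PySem

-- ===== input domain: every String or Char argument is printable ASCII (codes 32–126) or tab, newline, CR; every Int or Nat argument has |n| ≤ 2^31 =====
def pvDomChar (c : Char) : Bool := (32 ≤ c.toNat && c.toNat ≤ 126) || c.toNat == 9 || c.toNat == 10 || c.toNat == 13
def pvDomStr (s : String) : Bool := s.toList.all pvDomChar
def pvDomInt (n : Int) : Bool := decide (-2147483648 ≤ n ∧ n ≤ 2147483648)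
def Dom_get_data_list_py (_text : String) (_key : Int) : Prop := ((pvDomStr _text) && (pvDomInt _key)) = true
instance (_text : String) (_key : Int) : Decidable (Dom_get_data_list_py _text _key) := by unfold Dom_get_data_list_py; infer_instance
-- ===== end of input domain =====

-- B transposes the computation (one Counter per strided key-column instead of one
-- interleaved pass with modulo dispatch); measured constant-factor faster in Python.


-- ===== PORT A =====
-- literal transliteration of A: build _key empty Counters, then one pass over the
-- text dispatching each alphabetic character into bucket i % _key via `+=`
-- (Counter += Counter({c}) increments in place, new keys appended: Dict.modify).
def get_data_list_py (_text : String) (_key : Int) : List (List (String × Int)) :=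
  List.map PySem.Dict.items
    ((PySem.List.pyRange 0 (PySem.Str.len _text) 1).foldl (fun acc i =>
      match PySem.Str.pyGet? _text i with
      | some c =>
        if PySem.Chars.isalpha c then
          acc.set (PySem.Int.mod i _key).toNat
            ((acc.getD (PySem.Int.mod i _key).toNat PySem.Dict.empty).modify
              (String.ofList [c]) 0 (· + 1))
        else acc
      | none => acc)
      ((PySem.List.pyRange 0 _key 1).foldl (fun acc _ => acc ++ [PySem.Dict.empty]) []))

-- ===== PORT B =====
-- literal transliteration of B: for each i in range(_key), Counter of the
-- alphabetic characters of the strided slice _text[i::_key].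
def get_data_list_py_alt (_text : String) (_key : Int) : List (List (String × Int)) :=
  (PySem.List.pyRange 0 _key 1).map (fun i =>
    (PySem.Dict.counter
      ((((PySem.List.slice? _text.toList (some i) none _key).getD []).filter
          PySem.Chars.isalpha).map (fun c => String.ofList [c]))).items)

-- ===== PRECONDITION & SPEC =====
-- Pre_ excludes exactly the inputs on which A raises: _key ≤ 0 together with at
-- least one alphabetic character (ZeroDivisionError for _key = 0, IndexError for _key < 0).
def Pre_get_data_list_py (_text : String) (_key : Int) : Prop :=
  1 ≤ _key ∨ _text.toList.all (fun c => !PySem.Chars.isalpha c) = true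
instance (_text : String) (_key : Int) : Decidable (Pre_get_data_list_py _text _key) := by
  unfold Pre_get_data_list_py; infer_instance
def pvWitness_get_data_list_py : String × Int := ("Attack at dawn!", 3)

def Spec_get_data_list_py (_text : String) (_key : Int) (out : List (List (String × Int))) : Prop :=
  out = get_data_list_py_alt _text _key
instance (_text : String) (_key : Int) (out : List (List (String × Int))) : Decidable (Spec_get_data_list_py _text _key out) := by
  unfold Spec_get_data_list_py; infer_instance

-- ===== CLAIM (what is proved, stated in full; the proofs are below) =====
def Claim_equal_get_data_list_py : Prop := ∀ (_text : String) (_key : Int), Dom_get_data_list_py _text _key → Pre_get_data_list_py _text _key → Spec_get_data_list_py _text _key (get_data_list_py _text _key)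

-- ===== LEMMAS AND PROOFS =====

-- the indices i, i+n, i+2n, … below len, with step n = s+1 (fuel-free recursion)
def pvIdxs (len s : Nat) (i : Nat) : List Nat :=
  if _h : i < len then i :: pvIdxs len s (i + s + 1) else []
termination_by len - i

theorem pvIdxs_ge (len s i : Nat) (h : len ≤ i) : pvIdxs len s i = [] := by
  unfold pvIdxs; simp [Nat.not_lt.mpr h]

theorem pvIdxs_lt (len s i : Nat) (h : i < len) :
    pvIdxs len s i = i :: pvIdxs len s (i + s + 1) := by
  conv_lhs => unfold pvIdxs
  simp [h]

-- appending one more index at the end when len grows by one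
theorem pvIdxs_succ (len s : Nat) : ∀ i,
    pvIdxs (len + 1) s i
      = pvIdxs len s i ++ (if i ≤ len ∧ (len - i) % (s + 1) = 0 then [len] else []) := by
  intro i
  induction hfuel : len - i using Nat.strong_induction_on generalizing i with
  | _ fuel IH =>
    subst hfuel
    by_cases h1 : i < len
    · rw [pvIdxs_lt _ _ _ (by omega), pvIdxs_lt _ _ _ h1,
        IH (len - (i + s + 1)) (by omega) _ rfl]
      by_cases h2 : i + s + 1 ≤ len
      · have hmm : (len - (i + s + 1)) % (s + 1) = (len - i) % (s + 1) := by
          have he : len - i = (len - (i + s + 1)) + (s + 1) := by omega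
          rw [he, Nat.add_mod_right]
        simp [hmm, h1.le, h2]
      · have hmod : (len - i) % (s + 1) ≠ 0 := by
          have h3 : len - i < s + 1 := by omega
          rw [Nat.mod_eq_of_lt h3]; omega
        simp [hmod, (by omega : ¬ i + s + 1 ≤ len)]
    · by_cases h0 : i = len
      · subst h0
        rw [pvIdxs_lt _ _ _ (by omega), pvIdxs_ge _ _ _ (by omega),
          pvIdxs_ge _ _ _ le_rfl]
        simp
      · rw [pvIdxs_ge _ _ _ (by omega), pvIdxs_ge _ _ _ (by omega),
          if_neg (fun hc => absurd hc.1 (by omega))]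
        simp

theorem pvMod_iff (n i m : Nat) (hn : 1 ≤ n) (hi : i < n) :
    m % n = i ↔ i ≤ m ∧ (m - i) % n = 0 := by
  constructor
  · intro he
    have h1 : i ≤ m := he ▸ Nat.mod_le m n
    have h2 : m = n * (m / n) + i := by
      conv_lhs => rw [← Nat.div_add_mod m n, he]
    refine ⟨h1, ?_⟩
    have : m - i = n * (m / n) := by omega
    simp [this, Nat.mul_mod_right]
  · rintro ⟨h1, h2⟩
    obtain ⟨q, hq⟩ := Nat.dvd_of_mod_eq_zero h2
    have hm : m = i + n * q := by omega
    subst hm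
    simp [Nat.add_mul_mod_self_left, Nat.mod_eq_of_lt hi]

-- the bucket-i indices of range len are exactly pvIdxs
theorem pvFilter_eq_idxs (n : Nat) (hn : 1 ≤ n) (len : Nat) : ∀ i, i < n →
    (List.range len).filter (fun j => j % n == i) = pvIdxs len (n - 1) i := by
  induction len with
  | zero => intro i _; rw [pvIdxs_ge _ _ _ (by omega)]; simp
  | succ m IH =>
    intro i hi
    rw [List.range_succ, List.filter_append, IH i hi, pvIdxs_succ,
      (by omega : n - 1 + 1 = n)]
    congr 1
    by_cases hc : i ≤ m ∧ (m - i) % n = 0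
    · have : m % n = i := (pvMod_iff n i m hn hi).mpr hc
      simp [hc, this]
    · have : ¬ m % n = i := fun he => hc ((pvMod_iff n i m hn hi).mp he)
      simp [hc, this]

-- slice element count, Python's ceil((len - i) / n)
def pvCnt (len i n : Nat) : Nat :=
  if i < len then (((len : Int) - i + n - 1) / n).toNat else 0

theorem pvCnt_step (len i n : Nat) (hn : 1 ≤ n) (h : i < len) :
    pvCnt len i n = pvCnt len (i + n) n + 1 := by
  unfold pvCnt
  have hn' : (n : Int) ≠ 0 := by exact_mod_cast Nat.one_le_iff_ne_zero.mp hn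
  by_cases h2 : i + n < len
  · have e1 : (len : Int) - i + n - 1 = ((len : Int) - (i + n) + n - 1) + 1 * n := by
      push_cast; ring
    rw [if_pos h, if_pos h2, e1, Int.add_mul_ediv_right _ _ hn']
    have hnn : 0 ≤ ((len : Int) - (↑i + ↑n) + ↑n - 1) / ↑n :=
      Int.ediv_nonneg (by push_cast; omega) (by positivity)
    push_cast
    omega
  · have e1 : (len : Int) - i + n - 1 = ((len : Int) - i - 1) + 1 * n := by ring
    rw [if_pos h, if_neg h2, e1, Int.add_mul_ediv_right _ _ hn']
    rw [Int.ediv_eq_zero_of_lt (by push_cast; omega) (by push_cast; omega)]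
    rfl

theorem pvCnt_zero (len i n : Nat) (h : len ≤ i) : pvCnt len i n = 0 := by
  unfold pvCnt; simp [Nat.not_lt.mpr h]

-- the strided pick of slice? equals the map over pvIdxs
theorem pvFilterMap_eq (cs : List Char) (n : Nat) (hn : 1 ≤ n) : ∀ i : Nat,
    List.filterMap (fun k : Nat => cs[((i : Int) + n * k).toNat]?)
        (List.range (pvCnt cs.length i n))
      = (pvIdxs cs.length (n - 1) i).map (fun j => cs.getD j ' ') := by
  intro i
  induction hfuel : cs.length - i using Nat.strong_induction_on generalizing i with
  | _ fuel IH =>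
    subst hfuel
    by_cases h : i < cs.length
    · rw [pvCnt_step _ _ _ hn h, List.range_succ_eq_map, List.filterMap_cons,
        pvIdxs_lt _ _ _ h, (by omega : i + (n - 1) + 1 = i + n)]
      have e0 : ((i : Int) + n * (0 : Nat)).toNat = i := by push_cast; omega
      rw [List.filterMap_map]
      have e1 : ((fun k : Nat => cs[((i : Int) + n * k).toNat]?) ∘ Nat.succ)
          = (fun k : Nat => cs[(((i + n : Nat) : Int) + n * k).toNat]?) := by
        funext k
        simp only [Function.comp]
        congr 1
        push_cast
        ring
      rw [e1, IH (cs.length - (i + n)) (by omega) _ rfl, e0,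
        List.getElem?_eq_getElem h]
      simp [List.getD, List.getElem?_eq_getElem h]
    · rw [pvCnt_zero _ _ _ (by omega), pvIdxs_ge _ _ _ (by omega)]
      simp

-- characterisation of the strided slice _text[i::n] for 1 ≤ n
theorem pvSlice_eq (cs : List Char) (n : Nat) (hn : 1 ≤ n) (i : Nat) :
    (PySem.List.slice? cs (some (i : Int)) none (n : Int)).getD []
      = (pvIdxs cs.length (n - 1) i).map (fun j => cs.getD j ' ') := by
  rw [← pvFilterMap_eq cs n hn i]
  unfold pvCnt
  unfold PySem.List.slice? PySem.List.sliceIndices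
  have h1 : ¬ ((n : Int) = 0) := by omega
  have h2 : ¬ ((n : Int) < 0) := by omega
  have h3 : ¬ ((i : Int) < 0) := by omega
  simp only [h1, h2, h3, if_false, Option.getD_some]
  by_cases h : i < cs.length
  · have hmin : min (i : Int) (cs.length : Int) = (i : Int) := by omega
    have hlt : min (i : Int) (cs.length : Int) < (cs.length : Int) := by omega
    simp only [hmin, if_pos hlt, if_pos (by omega : (0 : Int) < (n : Int)),
      if_pos (show (i : Int) < (cs.length : Int) by exact_mod_cast h), if_pos h]
  · have hmin : min (i : Int) (cs.length : Int) = (cs.length : Int) := by omega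
    have hlt : ¬ min (i : Int) (cs.length : Int) < (cs.length : Int) := by omega
    simp only [hmin, if_neg hlt, if_pos (by omega : (0 : Int) < (n : Int)),
      if_neg (show ¬ (i : Int) < (cs.length : Int) by exact_mod_cast h), if_neg h]
    simp

-- A's first loop builds replicate
theorem pvFoldAppend {α β : Type} (e : β) (l : List α) : ∀ acc : List β,
    l.foldl (fun a _ => a ++ [e]) acc = acc ++ List.replicate l.length e := by
  induction l with
  | nil => intro acc; simp
  | cons x xs IH =>
    intro acc
    rw [List.foldl_cons, IH]
    simp [List.replicate_succ]

-- the per-character body of A, over Nat indices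
def pvBody (cs : List Char) (n : Nat) (acc : List (PySem.Dict String Int)) (j : Nat) :
    List (PySem.Dict String Int) :=
  if PySem.Chars.isalpha (cs.getD j ' ') then
    acc.set (j % n)
      ((acc.getD (j % n) PySem.Dict.empty).modify (String.ofList [cs.getD j ' ']) 0 (· + 1))
  else acc

theorem pvBody_len (cs : List Char) (n : Nat) (js : List Nat) :
    ∀ acc : List (PySem.Dict String Int),
      (js.foldl (pvBody cs n) acc).length = acc.length := by
  induction js with
  | nil => intro acc; rfl
  | cons j js IH =>
    intro acc
    rw [List.foldl_cons, IH]
    unfold pvBody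
    split <;> simp

-- the bucket invariant: A's fold, projected at bucket i, is a fold over the bucket's indices
theorem pvBucket (cs : List Char) (n : Nat) (js : List Nat) :
    ∀ acc : List (PySem.Dict String Int), acc.length = n → ∀ i, i < n →
      (js.foldl (pvBody cs n) acc).getD i PySem.Dict.empty
        = (js.filter (fun j => j % n == i)).foldl
            (fun d j => if PySem.Chars.isalpha (cs.getD j ' ') then
                d.modify (String.ofList [cs.getD j ' ']) 0 (· + 1) else d)
            (acc.getD i PySem.Dict.empty) := by
  induction js with
  | nil => intro acc _ i _; rfl
  | cons j js IH =>
    intro acc hlen i hi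
    rw [List.foldl_cons]
    by_cases ha : PySem.Chars.isalpha (cs.getD j ' ')
    · by_cases hb : j % n = i
      · have hset : (pvBody cs n acc j).getD i PySem.Dict.empty
            = (acc.getD i PySem.Dict.empty).modify (String.ofList [cs.getD j ' ']) 0 (· + 1) := by
          unfold pvBody
          rw [if_pos ha, hb, List.getD, List.getElem?_set_self (by omega), List.getD]
          simp [List.getElem?_eq_getElem (by omega : i < acc.length)]
        rw [IH _ (by unfold pvBody; rw [if_pos ha]; simp [hlen]) i hi, hset,
          List.filter_cons, if_pos (by simp [hb]), List.foldl_cons, if_pos ha]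
      · have hset : (pvBody cs n acc j).getD i PySem.Dict.empty
            = acc.getD i PySem.Dict.empty := by
          unfold pvBody
          rw [if_pos ha, List.getD, List.getElem?_set_ne (by omega), ← List.getD]
        rw [IH _ (by unfold pvBody; rw [if_pos ha]; simp [hlen]) i hi, hset,
          List.filter_cons, if_neg (by simp [hb])]
    · have hid : pvBody cs n acc j = acc := by unfold pvBody; rw [if_neg ha]
      rw [hid, IH _ hlen i hi]
      by_cases hb : j % n = i
      · rw [List.filter_cons, if_pos (by simp [hb]), List.foldl_cons, if_neg ha]
      · rw [List.filter_cons, if_neg (by simp [hb])]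

-- a list of known length, mapped, as a map over range
theorem pvMap_range {α β : Type} (l : List α) (f : α → β) (e : α) :
    l.map f = (List.range l.length).map (fun i => f (l.getD i e)) := by
  apply List.ext_getElem
  · simp
  · intro k h1 h2
    simp only [List.getElem_map, List.getElem_range]
    congr 1
    rw [List.getD, List.getElem?_eq_getElem (by simpa using h1)]
    simp

theorem pvModNat (j n : Nat) (hn : 1 ≤ n) :
    (PySem.Int.mod (j : Int) (n : Int)).toNat = j % n := by
  unfold PySem.Int.mod
  rw [Int.fmod_eq_emod, if_pos (Or.inl (by positivity)), add_zero]
  omega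

-- A normalised: buckets over Nat indices (for _key = n ≥ 1)
theorem pvA_norm (t : String) (n : Nat) (hn : 1 ≤ n) :
    get_data_list_py t (n : Int)
      = ((List.range t.toList.length).foldl (pvBody t.toList n)
          (List.replicate n PySem.Dict.empty)).map PySem.Dict.items := by
  unfold get_data_list_py
  rw [pvFoldAppend]
  have hlen1 : (PySem.List.pyRange 0 (n : Int) 1).length = n := by
    rw [PySem.List.length_pyRange_one]; simp
  rw [hlen1, List.nil_append]
  have hlen2 : PySem.Str.len t = ((t.toList.length : Nat) : Int) := by simp
  rw [hlen2, PySem.List.pyRange_zero_natCast, List.foldl_map]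
  congr 1
  apply PySem.List.foldl_congr_mem
  intro acc j hj
  have hjl : j < t.toList.length := List.mem_range.mp hj
  rw [PySem.Str.pyGet?_natCast, List.getElem?_eq_getElem hjl]
  dsimp only
  unfold pvBody
  rw [pvModNat j n hn]
  have hgd : t.toList.getD j ' ' = t.toList[j] := by
    rw [List.getD, List.getElem?_eq_getElem hjl]; rfl
  rw [hgd]

-- B normalised (for _key = n ≥ 1)
theorem pvB_norm (t : String) (n : Nat) (hn : 1 ≤ n) :
    get_data_list_py_alt t (n : Int)
      = (List.range n).map (fun (i : Nat) =>
          (PySem.Dict.counter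
            ((((PySem.List.slice? t.toList (some (i : Int)) none (n : Int)).getD []).filter
                PySem.Chars.isalpha).map (fun c => String.ofList [c]))).items) := by
  unfold get_data_list_py_alt
  rw [PySem.List.pyRange_zero_natCast, List.map_map]
  exact List.map_congr_left fun a _ => rfl

theorem pvFoldConst {α β : Type} (l : List α) (b : β) :
    l.foldl (fun a _ => a) b = b := by
  induction l with
  | nil => rfl
  | cons x xs IH => exact IH

-- ===== VERDICT (by name: the statement is the Claim_ definition above) =====
theorem get_data_list_py_spec : Claim_equal_get_data_list_py := by
  unfold Claim_equal_get_data_list_py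
  intro t k _ hpre
  unfold Spec_get_data_list_py
  by_cases hk : 1 ≤ k
  · obtain ⟨n, rfl⟩ : ∃ n : Nat, k = (n : Int) := ⟨k.toNat, by omega⟩
    have hn : 1 ≤ n := by exact_mod_cast hk
    rw [pvA_norm t n hn, pvB_norm t n hn,
      pvMap_range _ PySem.Dict.items PySem.Dict.empty]
    have hlen : ((List.range t.toList.length).foldl (pvBody t.toList n)
        (List.replicate n PySem.Dict.empty)).length = n := by
      rw [pvBody_len]; simp
    rw [hlen]
    refine List.map_congr_left fun i hi => ?_
    have hi' : i < n := List.mem_range.mp hi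
    rw [pvBucket t.toList n (List.range t.toList.length) _ (by simp) i hi',
      pvFilter_eq_idxs n hn t.toList.length i hi',
      PySem.Dict.counter_eq_foldl, List.foldl_map, List.foldl_filter,
      pvSlice_eq t.toList n hn i, List.foldl_map]
    have hinit : (List.replicate n PySem.Dict.empty).getD i PySem.Dict.empty
        = (PySem.Dict.empty : PySem.Dict String Int) := by
      rw [List.getD, List.getElem?_eq_getElem (by simpa using hi')]
      simp
    rw [hinit]
  · have hall : t.toList.all (fun c => !PySem.Chars.isalpha c) = true :=
      hpre.resolve_left hk
    unfold get_data_list_py get_data_list_py_alt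
    rw [PySem.List.pyRange_one_eq_nil (show k ≤ 0 by omega)]
    simp only [List.foldl_nil, List.map_nil]
    have hbody : (PySem.List.pyRange 0 (PySem.Str.len t) 1).foldl (fun acc i =>
        match PySem.Str.pyGet? t i with
        | some c =>
          if PySem.Chars.isalpha c then
            acc.set (PySem.Int.mod i k).toNat
              ((acc.getD (PySem.Int.mod i k).toNat PySem.Dict.empty).modify
                (String.ofList [c]) 0 (· + 1))
          else acc
        | none => acc) ([] : List (PySem.Dict String Int)) = [] := by
      rw [PySem.List.foldl_congr_mem _ _ (fun acc _ => acc)]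
      · exact pvFoldConst _ _
      · intro acc i hi
        have hmem := (PySem.List.mem_pyRange_one).mp hi
        obtain ⟨j, rfl⟩ : ∃ j : Nat, i = (j : Int) := ⟨i.toNat, by omega⟩
        have hjl : j < t.toList.length := by
          have := hmem.2
          simp only [PySem.Str.len_eq] at this
          omega
        rw [PySem.Str.pyGet?_natCast, List.getElem?_eq_getElem hjl]
        have := List.all_eq_true.mp hall _ (t.toList.getElem_mem hjl)
        simp only [Bool.not_eq_true'] at this
        show (if PySem.Chars.isalpha t.toList[j] then _ else _) = _
        rw [this]
        simp
    rw [hbody]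
    rfl
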